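-- pv_equiv track=rewrite | github.com/carlosp/advent-of-code | 2025/03-lobby/solve_2.py | calculateMaxJoltage
-- ===== SOURCE A (Python) =====
-- def calculateMaxJoltage(joltageRatings: list[int], numBatteries: int) -> int:
-- 	if numBatteries == 1:
-- 		return max(joltageRatings)
-- 	elif numBatteries == len(joltageRatings):
-- 		return int(''.join(map(str, joltageRatings)))
--
-- 	largestAvailable = max(joltageRatings[:len(joltageRatings) - numBatteries + 1])
-- 	firstLargestIdx = joltageRatings.index(largestAvailable)
--
-- 	return largestAvailable * 10**(numBatteries - 1) + \
-- 		calculateMaxJoltage(joltageRatings[firstLargestIdx + 1:], numBatteries - 1)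
-- ===== SOURCE B (Python) =====
-- def calculateMaxJoltage(joltageRatings: list[int], numBatteries: int) -> int:
-- 	n = len(joltageRatings)
-- 	if not 1 <= numBatteries <= n:
-- 		raise ValueError("numBatteries must be between 1 and len(joltageRatings)")
-- 	# one pass, monotonic stack: greedily keep the largest order-preserving selection
-- 	picks = []
-- 	for i, v in enumerate(joltageRatings):
-- 		while picks and picks[-1] < v and len(picks) + (n - i) > numBatteries:
-- 			picks.pop()
-- 		if len(picks) < numBatteries:
-- 			picks.append(v)
-- 	# read the selection as consecutive digits
-- 	value = 0
-- 	for v in picks: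
-- 		value = value * 10 + v
-- 	return value
-- ===== Notes on version B (the rewrite author's own statement) =====
-- stated objective: faster
-- what changed: A's O(n*k) recursive greedy (each pick slices the list, takes max of a window and list.index, with string-join base cases) is replaced by one monotonic-stack pass that keeps the best k-element subsequence and one Horner pass that reads it as digits; Pre_ excludes k outside 1..len (A always raises there) and ratings with a negative or multi-digit value in a position one of A's string joins may cover, where A raises ValueError or returns a value mixing one-digit positional arithmetic with string concatenation, an artefact of its implementation.
-- outside the precondition, e.g. on calculateMaxJoltage([5, 9, 3, 12], 3): A returns 1212, B returns 942; on calculateMaxJoltage([3, 12], 2): A returns 312, B returns 42; on calculateMaxJoltage([5, -3], 2): A raises ValueError, B returns 47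
import Mathlib
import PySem

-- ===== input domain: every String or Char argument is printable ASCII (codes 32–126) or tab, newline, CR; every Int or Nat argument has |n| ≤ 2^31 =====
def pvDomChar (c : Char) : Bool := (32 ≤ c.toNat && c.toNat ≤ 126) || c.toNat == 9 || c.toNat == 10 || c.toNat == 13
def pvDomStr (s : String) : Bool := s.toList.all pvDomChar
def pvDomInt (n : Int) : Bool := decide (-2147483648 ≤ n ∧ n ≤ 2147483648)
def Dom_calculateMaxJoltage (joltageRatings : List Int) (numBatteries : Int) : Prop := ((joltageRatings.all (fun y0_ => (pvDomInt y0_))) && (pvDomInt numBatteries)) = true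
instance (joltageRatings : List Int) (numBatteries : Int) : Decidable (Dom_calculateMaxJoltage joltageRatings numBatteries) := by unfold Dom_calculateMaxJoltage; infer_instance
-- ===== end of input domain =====

-- B replaces A's O(n·k) recursive greedy (slice + max + index per pick) by one monotonic-stack
-- pass over the list followed by one Horner pass (objective: faster).

-- ===== PORT A =====
-- int(s), ported by hand as an exact replica of Python's base-10 int() (surrounding whitespace,
-- optional sign, digits with single '_' separators; none = ValueError).  PySem.Int.ofStr?
-- computes the same function, but its digit loop is private to the prelude, which the
-- equivalence proof below cannot unfold; this replica is proof-transparent.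
def cmjGoA : List Char → Bool → Nat → Option Nat
  | [], afterDigit, acc => if afterDigit = true then some acc else none
  | c :: rest, afterDigit, acc =>
    if c.isDigit = true then cmjGoA rest true (acc * 10 + (c.toNat - '0'.toNat))
    else
      if c = '_' ∧ afterDigit = true then
        match rest with
        | d :: _tail => if d.isDigit = true then cmjGoA rest false acc else none
        | [] => none
      else none

def cmjDigitsValA? : List Char → Option Nat
  | [] => none
  | cs => cmjGoA cs false 0

def cmjIntOfChars? (s : List Char) : Option Int :=
  match (List.dropWhile PySem.Int.isIntSpace (List.dropWhile PySem.Int.isIntSpace s).reverse).reverse with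
  | '-' :: ds => Option.map (fun n => -n) do let a ← cmjDigitsValA? ds; pure (a : Int)
  | '+' :: ds => Option.map (fun n => n) do let a ← cmjDigitsValA? ds; pure (a : Int)
  | ds => Option.map (fun n => n) do let a ← cmjDigitsValA? ds; pure (a : Int)

def calculateMaxJoltage (joltageRatings : List Int) (numBatteries : Int) : Int :=
  if numBatteries = 1 then
    (PySem.List.max? joltageRatings (fun y => y)).getD 0   -- max([]) raises ValueError: outside Pre_
  else if numBatteries = (joltageRatings.length : Int) then
    -- int(''.join(map(str, joltageRatings))): ''.join concatenates the character lists of the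
    -- str(x); an unparseable join (an inner '-') raises ValueError: outside Pre_
    (cmjIntOfChars? ((joltageRatings.map PySem.Int.toChars).flatten)).getD 0
  else
    match _hm : PySem.List.max? (PySem.List.slice joltageRatings none
        (some ((joltageRatings.length : Int) - numBatteries + 1))) (fun y => y) with
    | none => 0   -- max of an empty slice raises ValueError: outside Pre_
    | some largestAvailable =>
      match hidx : PySem.List.index? joltageRatings largestAvailable with
      | none => 0   -- unreachable: largestAvailable ∈ joltageRatings
      | some firstLargestIdx =>
        -- 10**(numBatteries-1): the exponent is ≥ 1 in this branch on Pre_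
        largestAvailable * 10 ^ (numBatteries - 1).toNat +
          calculateMaxJoltage (PySem.List.slice joltageRatings (some ((firstLargestIdx : Int) + 1)) none)
            (numBatteries - 1)
termination_by joltageRatings.length
decreasing_by
  obtain ⟨hk, -, -⟩ := PySem.List.getElem_of_index?_eq_some hidx
  rw [PySem.List.slice_from _ (by omega)]
  simp only [List.length_drop]
  omega

-- ===== PORT B =====
-- the stack is kept top-first (a Python list keeps its top last)
def cmjPop (k n i v : Int) : List Int → List Int
  | [] => []
  | w :: rest =>
    if w < v ∧ ((rest.length : Int) + 1) + (n - i) > k then cmjPop k n i v rest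
    else w :: rest

def cmjStep (k n : Int) (st : List Int) (p : Int × Int) : List Int :=
  let st' := cmjPop k n p.1 p.2 st
  if (st'.length : Int) < k then p.2 :: st' else st'

def cmjStack (joltageRatings : List Int) (k : Int) : List Int :=
  (List.foldl (cmjStep k (joltageRatings.length : Int)) [] (PySem.List.enumerate joltageRatings)).reverse

-- value = value * 10 + v over the picks
def cmjHorner (st : List Int) : Int :=
  List.foldl (fun acc v => acc * 10 + v) 0 st

def calculateMaxJoltage_alt (joltageRatings : List Int) (numBatteries : Int) : Int :=
  if ¬(1 ≤ numBatteries ∧ numBatteries ≤ (joltageRatings.length : Int)) then 0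
    -- raise ValueError: outside Pre_
  else cmjHorner (cmjStack joltageRatings numBatteries)

-- ===== PRECONDITION & SPEC =====
-- Pre_ requires 1 ≤ numBatteries ≤ len (outside that Python A always fails) and excludes ratings
-- with a negative or multi-digit value in a position one of A's string joins may cover (the last
-- numBatteries-1 positions when numBatteries ≥ 3, the whole list when numBatteries = len): there
-- A raises ValueError on int() of a string like '5-3', or returns a value that mixes one-digit
-- positional arithmetic with string concatenation — an artefact of its implementation — so this
-- also excludes some inputs on which A happens to return.
def Pre_calculateMaxJoltage (joltageRatings : List Int) (numBatteries : Int) : Prop :=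
  1 ≤ numBatteries ∧ numBatteries ≤ (joltageRatings.length : Int) ∧
    ((numBatteries = (joltageRatings.length : Int) ∨ 3 ≤ numBatteries) →
      ∀ x ∈ joltageRatings.drop (joltageRatings.length - numBatteries.toNat + 1), 0 ≤ x ∧ x ≤ 9) ∧
    ((numBatteries = (joltageRatings.length : Int) ∧ 2 ≤ joltageRatings.length) →
      ∀ x ∈ joltageRatings.take 1, 0 ≤ x)
instance (joltageRatings : List Int) (numBatteries : Int) : Decidable (Pre_calculateMaxJoltage joltageRatings numBatteries) := by unfold Pre_calculateMaxJoltage; infer_instance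

def pvWitness_calculateMaxJoltage : List Int × Int := ([3, 1, 4, 1, 5], 3)

def Spec_calculateMaxJoltage (joltageRatings : List Int) (numBatteries : Int) (out : Int) : Prop := out = calculateMaxJoltage_alt joltageRatings numBatteries
instance (joltageRatings : List Int) (numBatteries : Int) (out : Int) : Decidable (Spec_calculateMaxJoltage joltageRatings numBatteries out) := by unfold Spec_calculateMaxJoltage; infer_instance

-- ===== CLAIM (what is proved, stated in full; the proofs are below) =====
def Claim_equal_calculateMaxJoltage : Prop := ∀ (joltageRatings : List Int) (numBatteries : Int), Dom_calculateMaxJoltage joltageRatings numBatteries → Pre_calculateMaxJoltage joltageRatings numBatteries → Spec_calculateMaxJoltage joltageRatings numBatteries (calculateMaxJoltage joltageRatings numBatteries)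

-- ===== LEMMAS AND PROOFS =====

theorem cmjPop_subset {k n i v : Int} {st : List Int} {w : Int}
    (h : w ∈ cmjPop k n i v st) : w ∈ st := by
  induction st with
  | nil => simp [cmjPop] at h
  | cons u rest ih =>
    rw [cmjPop] at h
    split at h
    · exact List.mem_cons_of_mem _ (ih h)
    · exact h

theorem cmjFold_inv {k n : Int} (P : Int → Prop) :
    ∀ (chunk : List (Int × Int)) (st : List Int),
      (∀ q ∈ chunk, P q.2) → (∀ w ∈ st, P w) →
      ∀ w ∈ List.foldl (cmjStep k n) st chunk, P w := by
  intro chunk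
  induction chunk with
  | nil => intro st _ hst w hw; exact hst w hw
  | cons q rest ih =>
    intro st hchunk hst w hw
    refine ih _ (fun r hr => hchunk r (List.mem_cons_of_mem _ hr)) ?_ w hw
    intro r hr
    simp only [cmjStep] at hr
    split at hr
    · rcases List.mem_cons.mp hr with h | h
      · exact h ▸ hchunk q (List.mem_cons_self ..)
      · exact hst r (cmjPop_subset h)
    · exact hst r (cmjPop_subset hr)

theorem cmjPop_all {k n i v : Int} {st : List Int}
    (hlt : ∀ w ∈ st, w < v) (hroom : k ≤ n - i) : cmjPop k n i v st = [] := by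
  induction st with
  | nil => rfl
  | cons u rest ih =>
    rw [cmjPop]
    rw [if_pos ⟨hlt u (List.mem_cons_self ..), by omega⟩]
    exact ih (fun w hw => hlt w (List.mem_cons_of_mem _ hw))

theorem cmjPop_bottom {k n i v : Int} (b : Int) (T : List Int)
    (hb : ¬(b < v ∧ 1 + (n - i) > k)) :
    cmjPop k n i v (T ++ [b]) = cmjPop (k - 1) n i v T ++ [b] := by
  induction T with
  | nil =>
    simp only [List.nil_append, cmjPop]
    rw [if_neg (by simpa using hb)]
  | cons w T' ih =>
    simp only [List.cons_append, cmjPop]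
    have hiff : (w < v ∧ (((T' ++ [b]).length : Int) + 1) + (n - i) > k) ↔
        (w < v ∧ ((T'.length : Int) + 1) + (n - i) > k - 1) := by
      simp only [List.length_append, List.length_cons, List.length_nil]
      push_cast
      constructor <;> (rintro ⟨h1, h2⟩; exact ⟨h1, by omega⟩)
    by_cases hc : w < v ∧ ((T'.length : Int) + 1) + (n - i) > k - 1
    · rw [if_pos (hiff.mpr hc), if_pos hc]
      exact ih
    · rw [if_neg (fun hh => hc (hiff.mp hh)), if_neg hc]
      rfl

theorem cmjFold_bottom {k n : Int} (b : Int) :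
    ∀ (chunk : List (Int × Int)) (S : List Int),
      (∀ q ∈ chunk, ¬(b < q.2 ∧ 1 + (n - q.1) > k)) →
      List.foldl (cmjStep k n) (S ++ [b]) chunk = List.foldl (cmjStep (k - 1) n) S chunk ++ [b] := by
  intro chunk
  induction chunk with
  | nil => intro S _; rfl
  | cons q rest ih =>
    intro S hchunk
    simp only [List.foldl_cons]
    have hq := hchunk q (List.mem_cons_self ..)
    have hpop := cmjPop_bottom (i := q.1) (v := q.2) b S hq
    have hstep : cmjStep k n (S ++ [b]) q = cmjStep (k - 1) n S q ++ [b] := by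
      unfold cmjStep
      simp only [hpop]
      by_cases hl : ((cmjPop (k - 1) n q.1 q.2 S).length : Int) < k - 1
      · rw [if_pos (by simp only [List.length_append, List.length_cons, List.length_nil]; push_cast; omega), if_pos hl]
        rfl
      · rw [if_neg (by simp only [List.length_append, List.length_cons, List.length_nil]; push_cast; omega), if_neg hl]
    rw [hstep]
    exact ih _ (fun r hr => hchunk r (List.mem_cons_of_mem _ hr))

-- index shift on an enumerated pair
def cmjSh (d : Int) (p : Int × Int) : Int × Int := (p.1 + d, p.2)

theorem cmjPop_nshift (k n d i v : Int) : ∀ (S : List Int),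
    cmjPop k n (i + d) v S = cmjPop k (n - d) i v S := by
  intro S
  induction S with
  | nil => rfl
  | cons w rest ih =>
    simp only [cmjPop]
    by_cases hc : w < v ∧ ((rest.length : Int) + 1) + (n - d - i) > k
    · rw [if_pos (by exact ⟨hc.1, by omega⟩), if_pos hc]; exact ih
    · rw [if_neg (by intro hh; exact hc ⟨hh.1, by omega⟩), if_neg hc]

theorem cmjStep_shift (k n d : Int) (S : List Int) (q : Int × Int) :
    cmjStep k n S (cmjSh d q) = cmjStep k (n - d) S q := by
  unfold cmjStep cmjSh
  simp only [cmjPop_nshift]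

theorem cmjEnum_shift (xs : List Int) : ∀ (a d : Int),
    PySem.List.enumerate xs (a + d) = (PySem.List.enumerate xs a).map (cmjSh d) := by
  induction xs with
  | nil => intro a d; simp [PySem.List.enumerate_nil]
  | cons x xs ih =>
    intro a d
    rw [PySem.List.enumerate_cons, PySem.List.enumerate_cons]
    simp only [List.map_cons, cmjSh]
    rw [show a + d + 1 = (a + 1) + d by ring, ih]

theorem cmjFold_shift (k n d : Int) :
    ∀ (chunk : List (Int × Int)) (S : List Int),
      List.foldl (cmjStep k n) S (chunk.map (cmjSh d)) =
        List.foldl (cmjStep k (n - d)) S chunk := by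
  intro chunk
  induction chunk with
  | nil => intro S; rfl
  | cons q rest ih =>
    intro S
    simp only [List.map_cons, List.foldl_cons, cmjStep_shift]
    exact ih _

theorem cmjFold_zero (n : Int) : ∀ (chunk : List (Int × Int)),
    List.foldl (cmjStep 0 n) [] chunk = [] := by
  intro chunk
  induction chunk with
  | nil => rfl
  | cons q rest ih =>
    simp only [List.foldl_cons, cmjStep, cmjPop]
    rw [if_neg (by simp)]
    exact ih

-- the central decomposition: the stack of lst is its greedy head followed by the stack of the
-- remainder
theorem cmjStack_decomp (lst : List Int) (K : Nat) (v0 : Int) (i0 : Nat)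
    (hK1 : 1 ≤ K) (hKn : K ≤ lst.length)
    (hm : PySem.List.max? (lst.take (lst.length - K + 1)) (fun y => y) = some v0)
    (hi : PySem.List.index? lst v0 = some i0) :
    cmjStack lst (K : Int) = v0 :: cmjStack (lst.drop (i0 + 1)) ((K : Int) - 1) := by
  obtain ⟨pre, suf, hsplit, hlen, hnotin⟩ := (PySem.List.index?_eq_some_iff _ _ _).mp hi
  obtain ⟨hi0n, hgi0, hfirst⟩ := PySem.List.getElem_of_index?_eq_some hi
  have hi0win : i0 ≤ lst.length - K := by
    have hmem := PySem.List.max?_mem hm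
    obtain ⟨j, hj, hgj⟩ := List.getElem_of_mem hmem
    rw [List.getElem_take] at hgj
    have hjlen : j < lst.length - K + 1 := lt_of_lt_of_le hj (by simp [List.length_take])
    have : i0 ≤ j := by
      by_contra hcon
      exact hfirst j (by omega) hgj
    omega
  have hwin : ∀ (j : Nat), j < lst.length - K + 1 → (hj : j < lst.length) → lst[j] ≤ v0 := by
    intro j hjM hj
    have hlt : j < (lst.take (lst.length - K + 1)).length := by simp [List.length_take]; omega
    have hmem : lst[j] ∈ lst.take (lst.length - K + 1) :=
      (List.getElem_take (xs := lst)) ▸ List.getElem_mem hlt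
    exact PySem.List.max?_isMax hm _ hmem
  have htake : lst.take i0 = pre := by rw [hsplit]; exact List.take_left' hlen
  have hpre_lt : ∀ x ∈ pre, x < v0 := by
    intro x hx
    have h1 : x ∈ lst.take i0 := by rw [htake]; exact hx
    have h2 : lst.take i0 = (lst.take (lst.length - K + 1)).take i0 := by
      rw [List.take_take]; congr 1; omega
    have hxt : x ∈ lst.take (lst.length - K + 1) :=
      (List.take_prefix _ _).subset (h2 ▸ h1)
    have hle := PySem.List.max?_isMax hm x hxt
    have hne : x ≠ v0 := fun h => hnotin (h ▸ hx)
    simp only at hle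
    omega
  have hsuflen : lst.length = i0 + 1 + suf.length := by
    rw [hsplit]; simp [hlen]; omega
  have hsuf : lst.drop (i0 + 1) = suf := by
    have h2 : lst = (pre ++ [v0]) ++ suf := by rw [hsplit]; simp
    rw [h2, List.drop_left' (by simp [hlen])]
  have hsufwin : ∀ (j : Nat) (hj : j < suf.length), i0 + 1 + j ≤ lst.length - K → suf[j] ≤ v0 := by
    intro j hj hcase
    have hg : (lst.drop (i0 + 1))[j]'(by rw [List.length_drop]; omega) = lst[i0 + 1 + j]'(by omega) :=
      List.getElem_drop
    have hg2 : (lst.drop (i0 + 1))[j]'(by rw [List.length_drop]; omega) = suf[j] := by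
      simp only [hsuf]
    rw [hg2] at hg
    rw [hg]
    exact hwin (i0 + 1 + j) (by omega) (by omega)
  set n : Int := (lst.length : Int) with hn
  have henum : PySem.List.enumerate lst = PySem.List.enumerate pre ++
      (((i0 : Int), v0) :: PySem.List.enumerate suf ((i0 : Int) + 1)) := by
    show PySem.List.enumerate lst 0 = PySem.List.enumerate pre 0 ++ _
    conv_lhs => rw [hsplit]
    rw [PySem.List.enumerate_append, PySem.List.enumerate_cons]
    simp [hlen]
  set S1 : List Int := List.foldl (cmjStep (K : Int) n) [] (PySem.List.enumerate pre) with hS1def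
  have hS1 : ∀ w ∈ S1, w < v0 := by
    rw [hS1def]
    apply cmjFold_inv (fun x => x < v0)
    · intro q hq
      obtain ⟨j, hj, hqe⟩ := (PySem.List.mem_enumerate_iff _ _ _).mp hq
      rw [hqe]
      exact hpre_lt _ (List.getElem_mem hj)
    · intro w hw; simp at hw
  have hstep1 : cmjStep (K : Int) n S1 ((i0 : Int), v0) = [v0] := by
    simp only [cmjStep]
    rw [cmjPop_all hS1 (by omega)]
    simp only [List.length_nil]
    rw [if_pos (by push_cast; omega)]
  have hcond : ∀ q ∈ PySem.List.enumerate suf ((i0 : Int) + 1),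
      ¬(v0 < q.2 ∧ 1 + (n - q.1) > (K : Int)) := by
    intro q hq
    obtain ⟨j, hj, hqe⟩ := (PySem.List.mem_enumerate_iff _ _ _).mp hq
    rw [hqe]
    simp only
    by_cases hcase : i0 + 1 + j ≤ lst.length - K
    · intro ⟨hlt, _⟩
      have := hsufwin j hj hcase
      omega
    · intro ⟨_, hroom⟩
      omega
  unfold cmjStack
  rw [henum, List.foldl_append, List.foldl_cons, ← hS1def, hstep1]
  rw [show [v0] = [] ++ [v0] from rfl]
  rw [cmjFold_bottom _ _ _ hcond]
  rw [show ((i0 : Int) + 1) = 0 + ((i0 : Int) + 1) by ring, cmjEnum_shift]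
  rw [cmjFold_shift]
  rw [List.reverse_append]
  simp only [List.reverse_cons, List.reverse_nil, List.nil_append, List.cons_append]
  rw [hsuf]
  have hlen2 : n - ((i0 : Int) + 1) = ((suf.length : Nat) : Int) := by rw [hn]; omega
  rw [hlen2]

-- the greedy head exists and sits inside the choice window
theorem cmjGreedyEx (lst : List Int) (K : Nat) (hK1 : 1 ≤ K) (hKn : K ≤ lst.length) :
    ∃ v0 i0, PySem.List.max? (lst.take (lst.length - K + 1)) (fun y => y) = some v0 ∧
      PySem.List.index? lst v0 = some i0 ∧ i0 ≤ lst.length - K := by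
  have htne : lst.take (lst.length - K + 1) ≠ [] := by
    intro h
    rw [List.take_eq_nil_iff] at h
    rcases h with h | h
    · omega
    · subst h; simp at hKn; omega
  obtain ⟨v0, hm⟩ : ∃ v0, PySem.List.max? (lst.take (lst.length - K + 1)) (fun y => y) = some v0 := by
    cases hmx : PySem.List.max? (lst.take (lst.length - K + 1)) (fun y => y) with
    | none => exact absurd ((PySem.List.max?_eq_none_iff _ _).mp hmx) htne
    | some v => exact ⟨v, rfl⟩
  have hv0mem : v0 ∈ lst := (List.take_prefix _ _).subset (PySem.List.max?_mem hm)
  obtain ⟨i0, hi⟩ : ∃ i0, PySem.List.index? lst v0 = some i0 := by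
    cases hix : PySem.List.index? lst v0 with
    | none => exact absurd hv0mem ((PySem.List.index?_eq_none_iff lst v0).mp hix)
    | some i => exact ⟨i, rfl⟩
  refine ⟨v0, i0, hm, hi, ?_⟩
  obtain ⟨hi0n, hgi0, hfirst⟩ := PySem.List.getElem_of_index?_eq_some hi
  obtain ⟨j, hj, hgj⟩ := List.getElem_of_mem (PySem.List.max?_mem hm)
  rw [List.getElem_take] at hgj
  have hjlen : j < lst.length - K + 1 := lt_of_lt_of_le hj (by simp [List.length_take])
  have : i0 ≤ j := by
    by_contra hcon
    exact hfirst j (by omega) hgj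
  omega

theorem cmjStack_zero (l : List Int) : cmjStack l 0 = [] := by
  unfold cmjStack
  rw [cmjFold_zero]
  rfl

-- length of the stack is exactly K
theorem cmjStack_length (N : Nat) : ∀ (lst : List Int) (K : Nat), lst.length = N → K ≤ lst.length →
    (cmjStack lst (K : Int)).length = K := by
  induction N using Nat.strong_induction_on with
  | _ N ih =>
    intro lst K hN hK
    rcases Nat.eq_zero_or_pos K with hK0 | hK1
    · subst hK0
      simp only [Nat.cast_zero, cmjStack_zero, List.length_nil]
    · obtain ⟨v0, i0, hm, hi, hi0⟩ := cmjGreedyEx lst K hK1 hK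
      rw [cmjStack_decomp lst K v0 i0 hK1 hK hm hi]
      simp only [List.length_cons]
      have hKK : ((K : Int) - 1) = (((K - 1 : Nat) : Nat) : Int) := by omega
      rw [hKK]
      rw [ih (lst.length - (i0 + 1)) (by omega) (lst.drop (i0 + 1)) (K - 1)
        (by simp [List.length_drop]) (by simp [List.length_drop]; omega)]
      omega

-- when every element must be taken, the stack is the whole list
theorem cmjStack_full_aux (n : Int) : ∀ (xs : List Int) (st : List Int) (a : Int),
    (st.length : Int) = a → n = a + xs.length →
    List.foldl (cmjStep n n) st (PySem.List.enumerate xs a) = xs.reverse ++ st := by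
  intro xs
  induction xs with
  | nil => intro st a _ _; simp [PySem.List.enumerate_nil]
  | cons x xs ih =>
    intro st a hsta hn
    rw [PySem.List.enumerate_cons, List.foldl_cons]
    have hpop : cmjPop n n a x st = st := by
      cases st with
      | nil => rfl
      | cons w rest =>
        rw [cmjPop, if_neg]
        rintro ⟨-, hgt⟩
        simp only [List.length_cons] at hsta
        omega
    have hstep : cmjStep n n st (a, x) = x :: st := by
      unfold cmjStep
      simp only [hpop]
      rw [if_pos (by simp only [List.length_cons] at hn ⊢; push_cast at hn ⊢; omega)]
    rw [hstep, ih (x :: st) (a + 1) (by simp [List.length_cons]; omega)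
      (by simp only [List.length_cons] at hn; push_cast at hn ⊢; omega)]
    simp

theorem cmjStack_full (l : List Int) : cmjStack l (l.length : Int) = l := by
  unfold cmjStack
  rw [show PySem.List.enumerate l = PySem.List.enumerate l 0 from rfl,
    cmjStack_full_aux (l.length : Int) l [] 0 (by simp) (by simp)]
  simp

-- the k = 1 stack is the leftmost maximum
theorem cmjStack_one (l : List Int) (hl : 1 ≤ l.length) :
    ∃ w, PySem.List.max? l (fun y => y) = some w ∧ cmjStack l ((1 : Nat) : Int) = [w] := by
  obtain ⟨v0, i0, hm, hi, -⟩ := cmjGreedyEx l 1 (le_refl 1) hl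
  have htake : l.take (l.length - 1 + 1) = l := by
    have : l.length - 1 + 1 = l.length := by omega
    rw [this, List.take_length]
  rw [htake] at hm
  refine ⟨v0, hm, ?_⟩
  rw [cmjStack_decomp l 1 v0 i0 (le_refl 1) hl (by rw [htake]; exact hm) hi]
  norm_num [cmjStack_zero]

theorem cmjHorner_aux (ys : List Int) : ∀ (a : Int),
    List.foldl (fun acc v => acc * 10 + v) a ys =
      a * 10 ^ ys.length + List.foldl (fun acc v => acc * 10 + v) 0 ys := by
  induction ys with
  | nil => intro a; simp
  | cons q ys ih =>
    intro a
    simp only [List.foldl_cons, List.length_cons]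
    rw [ih (a * 10 + q), ih (0 * 10 + q)]
    ring

theorem cmjHorner_cons (v : Int) (ys : List Int) :
    cmjHorner (v :: ys) = v * 10 ^ ys.length + cmjHorner ys := by
  unfold cmjHorner
  simp only [List.foldl_cons]
  rw [cmjHorner_aux ys (0 * 10 + v)]
  ring

-- ===== the hand-ported int() on nonempty digit strings =====

-- the numeric value of a digit string, as the parser's accumulator computes it
def cmjValC (ds : List Char) : Nat :=
  List.foldl (fun a c => a * 10 + (c.toNat - '0'.toNat)) 0 ds

theorem cmjValC_aux (ys : List Char) : ∀ (a : Nat),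
    List.foldl (fun a c => a * 10 + (c.toNat - '0'.toNat)) a ys =
      a * 10 ^ ys.length + cmjValC ys := by
  induction ys with
  | nil => intro a; simp [cmjValC]
  | cons c ys ih =>
    intro a
    simp only [List.foldl_cons, List.length_cons, cmjValC]
    rw [ih (a * 10 + (c.toNat - '0'.toNat)), ih (0 * 10 + (c.toNat - '0'.toNat))]
    ring

theorem cmjValC_append (xs ys : List Char) :
    cmjValC (xs ++ ys) = cmjValC xs * 10 ^ ys.length + cmjValC ys := by
  unfold cmjValC
  rw [List.foldl_append, cmjValC_aux]
  rfl

theorem cmjGoA_digits : ∀ (ds : List Char), (∀ c ∈ ds, c.isDigit = true) → ∀ (acc : Nat),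
    cmjGoA ds true acc = some (List.foldl (fun a c => a * 10 + (c.toNat - '0'.toNat)) acc ds) := by
  intro ds
  induction ds with
  | nil => intro _ acc; rfl
  | cons c rest ih =>
    intro hd acc
    simp only [cmjGoA]
    rw [if_pos (hd c (List.mem_cons_self ..)), List.foldl_cons]
    exact ih (fun x hx => hd x (List.mem_cons_of_mem _ hx)) _

theorem cmjDigitsValA_digits (ds : List Char) (hne : ds ≠ [])
    (hd : ∀ c ∈ ds, c.isDigit = true) : cmjDigitsValA? ds = some (cmjValC ds) := by
  cases ds with
  | nil => exact absurd rfl hne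
  | cons c rest =>
    show cmjGoA (c :: rest) false 0 = _
    simp only [cmjGoA]
    rw [if_pos (hd c (List.mem_cons_self ..))]
    rw [cmjGoA_digits rest (fun x hx => hd x (List.mem_cons_of_mem _ hx))]
    rfl

theorem cmjNotSpace_of_digit (c : Char) (hc : c.isDigit = true) :
    PySem.Int.isIntSpace c = false := by
  have hn : 48 ≤ c.toNat ∧ c.toNat ≤ 57 := by
    simp only [Char.isDigit, Bool.and_eq_true, decide_eq_true_eq] at hc
    exact ⟨hc.1, hc.2⟩
  simp only [PySem.Int.isIntSpace, Bool.or_eq_false_iff, decide_eq_false_iff_not]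
  refine ⟨⟨⟨⟨⟨?_, ?_⟩, ?_⟩, ?_⟩, ?_⟩, ?_⟩ <;> (intro h; subst h; revert hn; decide)

theorem cmjStrip_digits (s : List Char) (hne : s ≠ []) (hd : ∀ c ∈ s, c.isDigit = true) :
    (List.dropWhile PySem.Int.isIntSpace (List.dropWhile PySem.Int.isIntSpace s).reverse).reverse = s := by
  have h1 : List.dropWhile PySem.Int.isIntSpace s = s := by
    cases s with
    | nil => rfl
    | cons c rest =>
      rw [List.dropWhile_cons_of_neg]
      simp [cmjNotSpace_of_digit c (hd c (List.mem_cons_self ..))]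
  rw [h1]
  cases hr : s.reverse with
  | nil => exact absurd (by simpa using congrArg List.reverse hr) hne
  | cons c rest =>
    have hcs : c ∈ s := by
      have : c ∈ s.reverse := hr ▸ List.mem_cons_self ..
      simpa using this
    rw [List.dropWhile_cons_of_neg (by simp [cmjNotSpace_of_digit c (hd c hcs)]), ← hr,
      List.reverse_reverse]

theorem cmjIntOfChars_digits (s : List Char) (hne : s ≠ [])
    (hd : ∀ c ∈ s, c.isDigit = true) : cmjIntOfChars? s = some ((cmjValC s : Nat) : Int) := by
  cases s with
  | nil => exact absurd rfl hne
  | cons c rest =>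
    have hc : c.isDigit = true := hd c (List.mem_cons_self ..)
    unfold cmjIntOfChars?
    rw [cmjStrip_digits _ hne hd]
    split
    · -- '-' branch: the head is a digit, not '-'
      rename_i ds heq
      injection heq with h1 h2
      cases h1
      exact absurd hc (by decide)
    · -- '+' branch: the head is a digit, not '+'
      rename_i ds heq
      injection heq with h1 h2
      cases h1
      exact absurd hc (by decide)
    · rw [cmjDigitsValA_digits _ hne hd]
      rfl

theorem cmjDigitChar_toNat (m : Nat) (hm : m < 10) : (Nat.digitChar m).toNat - '0'.toNat = m := by
  interval_cases m <;> decide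

theorem cmjDigitChar_isDigit (m : Nat) (hm : m < 10) : (Nat.digitChar m).isDigit = true := by
  interval_cases m <;> decide

theorem cmjValC_single (c : Char) : cmjValC [c] = c.toNat - '0'.toNat := by
  simp [cmjValC]

theorem cmjValC_toDigits : ∀ (m : Nat), cmjValC (Nat.toDigits 10 m) = m := by
  intro m
  induction m using Nat.strong_induction_on with
  | _ m ih =>
    rw [Nat.toDigits_eq_if (by norm_num)]
    by_cases hm : m < 10
    · rw [if_pos hm, cmjValC_single]
      exact cmjDigitChar_toNat m hm
    · rw [if_neg hm, cmjValC_append, cmjValC_single]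
      have h1 : cmjValC (Nat.toDigits 10 (m / 10)) = m / 10 := ih _ (by omega)
      have h2 := cmjDigitChar_toNat (m % 10) (by omega)
      rw [h1, h2]
      simp only [List.length_cons, List.length_nil]
      omega

-- the joined string of a head ≥ 0 followed by single digits parses to the Horner value
theorem cmjJoin_digits (a : Int) (rest : List Int) (ha : 0 ≤ a)
    (hrest : ∀ x ∈ rest, 0 ≤ x ∧ x ≤ 9) :
    cmjIntOfChars? (((a :: rest).map PySem.Int.toChars).flatten) =
      some (cmjHorner (a :: rest)) := by
  have htl : ∀ x ∈ rest, PySem.Int.toChars x = [Nat.digitChar x.toNat] := by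
    intro x hx
    obtain ⟨hx0, hx9⟩ := hrest x hx
    unfold PySem.Int.toChars
    rw [if_neg (by omega), Nat.toDigits_of_lt_base (by omega)]
  have hflat : ((rest.map PySem.Int.toChars).flatten) = rest.map (fun x => Nat.digitChar x.toNat) := by
    induction rest with
    | nil => rfl
    | cons y ys ihy =>
      simp only [List.map_cons, List.flatten_cons]
      rw [htl y (List.mem_cons_self ..),
        ihy (fun x hx => hrest x (List.mem_cons_of_mem _ hx))
          (fun x hx => htl x (List.mem_cons_of_mem _ hx))]
      rfl
  have hhead : PySem.Int.toChars a = Nat.toDigits 10 a.toNat := by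
    unfold PySem.Int.toChars
    rw [if_neg (by omega)]
  have hchars : ((a :: rest).map PySem.Int.toChars).flatten =
      Nat.toDigits 10 a.toNat ++ rest.map (fun x => Nat.digitChar x.toNat) := by
    simp only [List.map_cons, List.flatten_cons, hflat, hhead]
  rw [hchars]
  have hdig : ∀ c ∈ Nat.toDigits 10 a.toNat ++ rest.map (fun x => Nat.digitChar x.toNat),
      c.isDigit = true := by
    intro c hc
    rcases List.mem_append.mp hc with h | h
    · exact Nat.isDigit_of_mem_toDigits (by norm_num) (by norm_num) h
    · obtain ⟨x, hx, rfl⟩ := List.mem_map.mp h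
      exact cmjDigitChar_isDigit x.toNat (by have := hrest x hx; omega)
  have hne : Nat.toDigits 10 a.toNat ++ rest.map (fun x => Nat.digitChar x.toNat) ≠ [] := by
    intro h
    have := Nat.length_toDigits_pos (b := 10) (n := a.toNat)
    have h2 := congrArg List.length h
    simp only [List.length_append, List.length_nil] at h2
    omega
  rw [cmjIntOfChars_digits _ hne hdig]
  congr 1
  rw [cmjValC_append, cmjValC_toDigits]
  -- cast the digit tail to the Horner value
  have hvalmap : ∀ (ys : List Int), (∀ x ∈ ys, 0 ≤ x ∧ x ≤ 9) →
      ((cmjValC (ys.map (fun x => Nat.digitChar x.toNat)) : Nat) : Int) = cmjHorner ys := by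
    intro ys
    induction ys with
    | nil => intro _; rfl
    | cons y ys ihy =>
      intro hys
      have ihv := ihy (fun x hx => hys x (List.mem_cons_of_mem _ hx))
      obtain ⟨hy0, hy9⟩ := hys y (List.mem_cons_self ..)
      simp only [List.map_cons]
      rw [show (Nat.digitChar y.toNat :: ys.map (fun x => Nat.digitChar x.toNat)) =
          [Nat.digitChar y.toNat] ++ ys.map (fun x => Nat.digitChar x.toNat) from rfl]
      rw [cmjValC_append, cmjValC_single, cmjHorner_cons,
        cmjDigitChar_toNat y.toNat (by omega)]
      push_cast
      rw [ihv, Int.toNat_of_nonneg hy0]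
      simp [List.length_map]
  rw [cmjHorner_cons]
  push_cast
  rw [hvalmap rest hrest, Int.toNat_of_nonneg ha]
  simp [List.length_map]

-- ===== main induction =====

theorem cmjMain (N : Nat) : ∀ (lst : List Int) (K : Nat), lst.length = N → 1 ≤ K → K ≤ N →
    ((K = N ∨ 3 ≤ K) → ∀ x ∈ lst.drop (N - K + 1), 0 ≤ x ∧ x ≤ 9) →
    ((K = N ∧ 2 ≤ N) → ∀ x ∈ lst.take 1, 0 ≤ x) →
    calculateMaxJoltage lst (K : Int) = calculateMaxJoltage_alt lst (K : Int) := by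
  induction N using Nat.strong_induction_on with
  | _ N ih =>
    intro lst K hN h1 h2 hdig hhead
    by_cases hK1 : K = 1
    · subst hK1
      obtain ⟨w, hmw, hst⟩ := cmjStack_one lst (by omega)
      rw [calculateMaxJoltage, if_pos (show ((1 : Nat) : Int) = 1 by norm_num), hmw]
      unfold calculateMaxJoltage_alt
      rw [if_neg (show ¬¬_ by
        rw [not_not]
        exact ⟨by norm_num, by push_cast; omega⟩), hst]
      simp [cmjHorner]
    · by_cases hKn : K = lst.length
      · -- k == len(joltageRatings): both sides are the concatenation of all ratings
        have hne : lst ≠ [] := by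
          intro h
          rw [h] at hKn
          simp at hKn
          omega
        obtain ⟨a, rest, hlst⟩ : ∃ a rest, lst = a :: rest := by
          cases lst with
          | nil => exact absurd rfl hne
          | cons a rest => exact ⟨a, rest, rfl⟩
        subst hlst
        have hrestd : ∀ x ∈ rest, 0 ≤ x ∧ x ≤ 9 := by
          intro x hx
          apply hdig (Or.inl (by omega)) x
          rw [show N - K + 1 = 1 by omega]
          simpa using hx
        have ha : 0 ≤ a := by
          exact hhead ⟨by omega, by omega⟩ a (by simp)
        rw [calculateMaxJoltage, if_neg (by omega), if_pos (by rw [hKn])]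
        unfold calculateMaxJoltage_alt
        rw [if_neg (by omega)]
        rw [show ((K : Nat) : Int) = (((a :: rest).length : Nat) : Int) by rw [hKn],
          cmjStack_full]
        rw [cmjJoin_digits a rest ha hrestd]
        rfl
      · have hKlt : K < lst.length := by omega
        obtain ⟨v0, i0, hm, hi, hi0⟩ := cmjGreedyEx lst K (by omega) (by omega)
        have hslice : PySem.List.slice lst none (some ((lst.length : Int) - (K : Int) + 1)) =
            lst.take (lst.length - K + 1) := by
          rw [show (lst.length : Int) - (K : Int) + 1 = ((lst.length - K + 1 : Nat) : Int) by
            push_cast; omega]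
          exact PySem.List.slice_to_natCast lst _
        rw [calculateMaxJoltage, if_neg (by omega),
          if_neg (by omega)]
        split
        case h_1 heq =>
          rw [hslice, hm] at heq
          exact absurd heq (by simp)
        case h_2 la heq =>
          rw [hslice, hm] at heq
          obtain rfl : v0 = la := Option.some.inj heq
          split
          case h_1 heq2 =>
            rw [hi] at heq2
            exact absurd heq2 (by simp)
          case h_2 idx heq2 =>
            rw [hi] at heq2
            obtain rfl : i0 = idx := Option.some.inj heq2
            set lst' : List Int := lst.drop (i0 + 1) with hlst'
            have hn' : lst'.length = lst.length - (i0 + 1) := by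
              rw [hlst', List.length_drop]
            -- the Pre_ conditions are inherited by the recursive call
            have hd' : (K - 1 = lst'.length ∨ 3 ≤ K - 1) →
                ∀ x ∈ lst'.drop (lst'.length - (K - 1) + 1), 0 ≤ x ∧ x ≤ 9 := by
              intro hcase x hx
              by_cases hK2 : K = 2
              · rcases hcase with hfc | h3
                · rw [show lst'.length - (K - 1) + 1 = lst'.length by omega,
                    List.drop_eq_nil_of_le (le_refl _)] at hx
                  simp at hx
                · omega
              · have h3K : 3 ≤ K := by omega
                apply hdig (Or.inr h3K) x
                have hsub : lst'.drop (lst'.length - (K - 1) + 1) =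
                    (lst.drop (N - K + 1)).drop (i0 + 1 + (lst'.length - (K - 1) + 1) - (N - K + 1)) := by
                  rw [hlst', List.drop_drop, List.drop_drop]
                  congr 1
                  simp only [List.length_drop]
                  omega
                rw [hsub] at hx
                exact List.drop_subset _ _ hx
            have hh' : (K - 1 = lst'.length ∧ 2 ≤ lst'.length) → ∀ x ∈ lst'.take 1, 0 ≤ x := by
              rintro ⟨hfc, h2'⟩ x hx
              have h3K : 3 ≤ K := by omega
              have hi0e : i0 = N - K := by omega
              have hxm : x ∈ lst.drop (N - K + 1) := by
                rw [hlst'] at hx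
                have hx2 : x ∈ lst.drop (i0 + 1) := List.take_subset _ _ hx
                have hdd : lst.drop (i0 + 1) = (lst.drop (N - K + 1)).drop (i0 + 1 - (N - K + 1)) := by
                  rw [List.drop_drop]
                  congr 1
                  omega
                rw [hdd] at hx2
                exact List.drop_subset _ _ hx2
              exact (hdig (Or.inr h3K) x hxm).1
            have hIH : calculateMaxJoltage lst' ((K : Int) - 1) =
                calculateMaxJoltage_alt lst' ((K : Int) - 1) := by
              have hcast : ((K : Int) - 1) = (((K - 1 : Nat) : Nat) : Int) := by omega
              rw [hcast]
              exact ih lst'.length (by omega) lst' (K - 1) rfl (by omega) (by omega) hd' hh'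
            rw [PySem.List.slice_from _ (by omega),
              show (((i0 : Int)) + 1).toNat = i0 + 1 by omega, ← hlst', hIH]
            -- and B takes one greedy step too
            unfold calculateMaxJoltage_alt
            rw [if_neg (by omega), if_neg (by omega)]
            rw [cmjStack_decomp lst K v0 i0 (by omega) (by omega) hm hi, ← hlst',
              cmjHorner_cons]
            have hlen : (cmjStack lst' ((K : Int) - 1)).length = K - 1 := by
              rw [show ((K : Int) - 1) = (((K - 1 : Nat) : Nat) : Int) by omega]
              exact cmjStack_length lst'.length lst' (K - 1) rfl (by omega)
            rw [hlen, show ((K : Int) - 1).toNat = K - 1 by omega]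

-- ===== VERDICT (by name: the statement is the Claim_ definition above) =====
theorem calculateMaxJoltage_spec : Claim_equal_calculateMaxJoltage := by
  intro lst k _ hpre
  obtain ⟨h1, h2, hdig, hhead⟩ := hpre
  unfold Spec_calculateMaxJoltage
  have hk : k = ((k.toNat : Nat) : Int) := by omega
  rw [hk]
  refine cmjMain lst.length lst k.toNat rfl (by omega) (by omega) ?_ ?_
  · intro hc x hx
    exact hdig (by rcases hc with h | h; exact Or.inl (by omega); exact Or.inr (by omega)) x hx
  · intro hc x hx
    exact hhead ⟨by omega, hc.2⟩ x hx
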